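-- pv_equiv track=rewrite | github.com/mengjihua/Binary-Battle | 每日一题/2025.8.4后/1323.py | maximum69Number2
-- ===== SOURCE A (Python) =====
-- def maximum69Number2 (num: int) -> int:
--     max_base = 0
--     base = 1
--     x = num
--     while x:
--         x, d = divmod(x, 10)
--         if d == 6:
--             max_base =  base
--         base *= 10
--     return num + max_base * 3
-- ===== SOURCE B (Python) =====
-- def maximum69Number2(num: int) -> int:
--     # Recursive rebuild: change the leftmost 6 to 9 while reconstructing the number.
--     def fix(n):
--         if n == 0:
--             return 0
--         q, d = divmod(n, 10)
--         f = fix(q)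
--         if f != q:          # a 6 was already changed in the higher digits
--             return f * 10 + d
--         if d == 6:          # this is the most significant 6
--             return q * 10 + 9
--         return n
--     return fix(num)
-- ===== Notes on version B (the rewrite author's own statement) =====
-- stated objective: alternative
-- what changed: A scans digits in a while loop maintaining base/max_base positional accumulators and adds 3*max_base at the end; B is a pure recursion that rebuilds the number back-to-front, replacing the leftmost 6 detected by comparing the recursive result of the high digits.
import Mathlib
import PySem

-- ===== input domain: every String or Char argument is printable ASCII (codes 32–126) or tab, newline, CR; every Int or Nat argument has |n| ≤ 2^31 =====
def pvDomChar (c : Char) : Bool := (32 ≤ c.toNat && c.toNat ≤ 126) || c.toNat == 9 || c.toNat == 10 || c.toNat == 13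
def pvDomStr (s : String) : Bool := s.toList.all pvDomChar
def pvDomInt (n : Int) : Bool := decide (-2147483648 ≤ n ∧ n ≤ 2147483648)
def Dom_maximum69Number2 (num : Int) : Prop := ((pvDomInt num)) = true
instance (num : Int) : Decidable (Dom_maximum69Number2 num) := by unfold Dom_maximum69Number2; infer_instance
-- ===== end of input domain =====

-- B recursively rebuilds the number, replacing the leftmost 6 (found by comparing the
-- recursive result on the high digits); A keeps base/max_base accumulators in a loop.

-- ===== PORT A =====
-- the while loop of A; the `0 < x` guard totalizes it (Python loops forever for x < 0)
def pyAloop (x base max_base : Int) : Int :=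
  if h : 0 < x then
    let d := PySem.Int.mod x 10
    let x' := PySem.Int.floordiv x 10
    pyAloop x' (base * 10) (if d = 6 then base else max_base)
  else max_base
termination_by x.toNat
decreasing_by
  simp only [PySem.Int.floordiv_eq_ediv_of_pos (by omega : (0:Int) < 10)]
  omega

def maximum69Number2 (num : Int) : Int := num + pyAloop num 1 0 * 3

-- ===== PORT B =====
-- B's inner `fix`; the `0 < n` guard totalizes it (Python recurses forever for n < 0)
def fixB (n : Int) : Int :=
  if h : 0 < n then
    let q := PySem.Int.floordiv n 10
    let d := PySem.Int.mod n 10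
    let f := fixB q
    if f ≠ q then f * 10 + d
    else if d = 6 then q * 10 + 9
    else n
  else 0
termination_by n.toNat
decreasing_by
  simp only [PySem.Int.floordiv_eq_ediv_of_pos (by omega : (0:Int) < 10)]
  omega

def maximum69Number2_alt (num : Int) : Int := fixB num

-- ===== PRECONDITION & SPEC =====
-- On num < 0 the Python A never returns (infinite while loop), so Pre_ excludes negatives.
def Pre_maximum69Number2 (num : Int) : Prop := 0 ≤ num
instance (num : Int) : Decidable (Pre_maximum69Number2 num) := by unfold Pre_maximum69Number2; infer_instance
def pvWitness_maximum69Number2 : Int := (9669)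

def Spec_maximum69Number2 (num : Int) (out : Int) : Prop := out = maximum69Number2_alt num
instance (num : Int) (out : Int) : Decidable (Spec_maximum69Number2 num out) := by unfold Spec_maximum69Number2; infer_instance

-- ===== CLAIM (what is proved, stated in full; the proofs are below) =====
def Claim_equal_maximum69Number2 : Prop := ∀ (num : Int), Dom_maximum69Number2 num → Pre_maximum69Number2 num → Spec_maximum69Number2 num (maximum69Number2 num)

-- ===== LEMMAS AND PROOFS =====

-- loop/recursion correspondence: pyAloop's max_base against fixB's rebuilt value
lemma key (n : Nat) : ∀ (x : Int), x.toNat = n → 0 ≤ x → ∀ base mb : Int,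
    (fixB x = x → pyAloop x base mb = mb) ∧
    (fixB x ≠ x → 3 * pyAloop x base mb = base * (fixB x - x)) := by
  induction n using Nat.strong_induction_on with
  | _ n ih =>
    intro x hn hx base mb
    by_cases hpos : 0 < x
    · have h10 : (0:Int) < 10 := by omega
      have hq : PySem.Int.floordiv x 10 = x / 10 := PySem.Int.floordiv_eq_ediv_of_pos h10
      have hd : PySem.Int.mod x 10 = x % 10 := PySem.Int.mod_eq_emod_of_pos h10
      set q := x / 10 with hqdef
      set d := x % 10 with hddef
      have hx10 : 10 * q + d = x := Int.mul_ediv_add_emod x 10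
      have hdb : 0 ≤ d ∧ d < 10 := ⟨Int.emod_nonneg x (by omega), Int.emod_lt_of_pos x h10⟩
      have hq0 : 0 ≤ q := by omega
      have hqlt : q.toNat < n := by omega
      have IH := ih q.toNat hqlt q rfl hq0
      have hA : pyAloop x base mb
          = pyAloop q (base * 10) (if d = 6 then base else mb) := by
        rw [pyAloop]; simp only [hpos, dif_pos]; rw [hq, hd]
      have hB : fixB x
          = (if fixB q ≠ q then fixB q * 10 + d else if d = 6 then q * 10 + 9 else x) := by
        rw [fixB]; simp only [hpos, dif_pos]; rw [hq, hd]
      by_cases hfq : fixB q = q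
      · by_cases hd6 : d = 6
        · have hBx : fixB x = q * 10 + 9 := by rw [hB]; simp [hfq, hd6]
          constructor
          · intro hfx; omega
          · intro _
            rw [hA, if_pos hd6, (IH (base * 10) base).1 hfq, hBx]
            have h3 : q * 10 + 9 - x = 3 := by omega
            rw [h3]; ring
        · have hBx : fixB x = x := by rw [hB]; simp [hfq, hd6]
          constructor
          · intro _
            have := (IH (base * 10) mb).1 hfq
            rw [hA]; simp [hd6, this]
          · intro hfx; exact absurd hBx hfx
      · have hBx : fixB x = fixB q * 10 + d := by rw [hB]; simp [hfq]
        have hne : fixB x ≠ x := by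
          intro h; apply hfq; omega
        constructor
        · intro h; exact absurd h hne
        · intro _
          have h2 := (IH (base * 10) (if d = 6 then base else mb)).2 hfq
          rw [hA, h2, hBx]
          have h3 : fixB q * 10 + d - x = 10 * (fixB q - q) := by omega
          rw [h3]; ring
    · have hx0 : x = 0 := by omega
      subst hx0
      have hA0 : pyAloop 0 base mb = mb := by rw [pyAloop]; simp
      have hB0 : fixB 0 = 0 := by rw [fixB]; simp
      constructor
      · intro _; exact hA0
      · intro h; exact absurd hB0 h

-- ===== VERDICT (by name: the statement is the Claim_ definition above) =====
theorem maximum69Number2_spec : Claim_equal_maximum69Number2 := by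
  intro num _ hpre
  unfold Spec_maximum69Number2 maximum69Number2 maximum69Number2_alt
  have hk := key num.toNat num rfl hpre 1 0
  by_cases h : fixB num = num
  · rw [hk.1 h, h]; ring
  · have := hk.2 h
    omega
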